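-- pv_equiv track=rewrite | github.com/johnpuksta/LeetcodeProblems | python/maxSubsequenceScore.py | maxScoreExcessMemory
-- ===== SOURCE A (Python) =====
-- from itertools import combinations
--
-- def maxScoreExcessMemory(nums1: list[int], nums2: list[int], k: int) -> int:
--     index, max = 0, 0
--     # These lines take up excessive memory for large values of k
--     combosNums1 = list(combinations(nums1, k))
--     combosNums2 = list(combinations(nums2, k))
--
--     for combo in combosNums1:
--         if (sum(combo) * min(combosNums2[index]) > max):
--             max = sum(combo) * min(combosNums2[index])
--         index += 1
--     return max
-- ===== SOURCE B (Python) =====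
-- def _go(pairs, need, s, m):
--     # best value of (s + sum of chosen firsts) * min(m, chosen seconds)
--     # over ways to choose `need` pairs from `pairs`; None if impossible.
--     if need == 0:
--         return s * m
--     if len(pairs) < need:
--         return None
--     (a, b), rest = pairs[0], pairs[1:]
--     m2 = b if m is None or b < m else m
--     take = _go(rest, need - 1, s + a, m2)
--     skip = _go(rest, need, s, m)
--     if take is None:
--         return skip
--     if skip is None:
--         return take
--     return max(take, skip)
--
--
-- def maxScoreExcessMemory(nums1: list[int], nums2: list[int], k: int) -> int:
--     pairs = list(zip(nums1, nums2))
--     if k < 1: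
--         return 0
--     r = _go(pairs, k, 0, None)
--     return 0 if r is None else max(0, r)
-- ===== Notes on version B (the rewrite author's own statement) =====
-- stated objective: alternative
-- what changed: Instead of materializing both combination lists and indexing one into the other, B zips the two arrays once and runs a single take/skip recursion over the pairs carrying the running sum and running minimum, so no combination tuples are ever built and memory is O(n) instead of O(C(n,k)*k). Pre_ excludes k <= 0 and unequal-length lists, on which A raises or (when nums2 is longer) pairs the i-th combination of nums1 with a combination of nums2 drawn from different indices, an accident of combination enumeration order.
-- outside the precondition, e.g. on maxScoreExcessMemory([1, 2, 3], [0, 5, 5, 9], 2): A returns 0, B returns 25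
import Mathlib
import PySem

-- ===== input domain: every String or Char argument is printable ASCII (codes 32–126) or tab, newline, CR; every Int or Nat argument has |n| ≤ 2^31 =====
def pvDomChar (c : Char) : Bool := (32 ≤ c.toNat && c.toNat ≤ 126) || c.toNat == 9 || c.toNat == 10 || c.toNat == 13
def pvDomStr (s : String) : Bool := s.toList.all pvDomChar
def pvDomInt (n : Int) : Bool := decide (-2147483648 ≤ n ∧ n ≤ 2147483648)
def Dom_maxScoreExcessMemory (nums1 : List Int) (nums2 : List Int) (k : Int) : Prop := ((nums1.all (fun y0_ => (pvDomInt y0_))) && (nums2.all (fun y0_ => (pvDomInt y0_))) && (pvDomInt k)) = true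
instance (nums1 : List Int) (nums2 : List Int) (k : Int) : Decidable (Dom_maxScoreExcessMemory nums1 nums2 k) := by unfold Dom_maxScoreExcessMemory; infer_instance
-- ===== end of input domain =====

-- B replaces the two materialized combination lists by one take/skip recursion over the
-- zipped pairs carrying the running sum and running minimum (objective: alternative).

-- ===== PORT A =====
-- the for-loop of A: walks combosNums1, indexing combosNums2 with the counter
def aLoop (c2 : List (List Int)) : List (List Int) → Int → Int → Int
  | [], _, mx => mx
  | combo :: rest, index, mx =>
    let m := (PySem.List.min? ((PySem.List.pyGet? c2 index).getD []) (fun x => x)).getD 0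
    let v := combo.sum * m
    aLoop c2 rest (index + 1) (if v > mx then v else mx)

def maxScoreExcessMemory (nums1 : List Int) (nums2 : List Int) (k : Int) : Int :=
  let combosNums1 := PySem.List.combinations nums1 k.toNat
  let combosNums2 := PySem.List.combinations nums2 k.toNat
  aLoop combosNums2 combosNums1 0 0

-- ===== PORT B =====
-- _go of Source B: best (s + sum of chosen firsts) * min of m and chosen seconds over
-- choices of `need` pairs; none if impossible
def bGo : List (Int × Int) → Nat → Int → Option Int → Option Int
  | _, 0, s, m => some (s * m.getD 0)
  | [], _ + 1, _, _ => none
  | (a, b) :: rest, need + 1, s, m =>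
    if rest.length + 1 < need + 1 then none
    else
      let m2 : Int := match m with | none => b | some v => if b < v then b else v
      let take := bGo rest need (s + a) (some m2)
      let skip := bGo rest (need + 1) s m
      match take, skip with
      | none, sk => sk
      | some t, none => some t
      | some t, some sk => some (max t sk)

def maxScoreExcessMemory_alt (nums1 : List Int) (nums2 : List Int) (k : Int) : Int :=
  let pairs := nums1.zip nums2
  if k < 1 then 0
  else
    match bGo pairs k.toNat 0 none with
    | none => 0
    | some r => max 0 r

-- ===== PRECONDITION & SPEC =====
-- Pre_ excludes k ≤ 0 (A raises ValueError) and unequal-length lists with k ≤ len(nums1)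
-- (A raises IndexError, or, when nums2 is longer, pairs the i-th combination of nums1 with
-- a combination of nums2 drawn from different indices — an accident of enumeration order).
def Pre_maxScoreExcessMemory (nums1 : List Int) (nums2 : List Int) (k : Int) : Prop :=
  1 ≤ k ∧ (nums1.length = nums2.length ∨ (nums1.length : Int) < k)
instance (nums1 : List Int) (nums2 : List Int) (k : Int) : Decidable (Pre_maxScoreExcessMemory nums1 nums2 k) := by unfold Pre_maxScoreExcessMemory; infer_instance

def pvWitness_maxScoreExcessMemory : List Int × List Int × Int := ([1, 2, 3], [4, 5, 6], 2)

def Spec_maxScoreExcessMemory (nums1 : List Int) (nums2 : List Int) (k : Int) (out : Int) : Prop := out = maxScoreExcessMemory_alt nums1 nums2 k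
instance (nums1 : List Int) (nums2 : List Int) (k : Int) (out : Int) : Decidable (Spec_maxScoreExcessMemory nums1 nums2 k out) := by unfold Spec_maxScoreExcessMemory; infer_instance

-- ===== CLAIM (what is proved, stated in full; the proofs are below) =====
def Claim_equal_maxScoreExcessMemory : Prop := ∀ (nums1 : List Int) (nums2 : List Int) (k : Int), Dom_maxScoreExcessMemory nums1 nums2 k → Pre_maxScoreExcessMemory nums1 nums2 k → Spec_maxScoreExcessMemory nums1 nums2 k (maxScoreExcessMemory nums1 nums2 k)
-- ===== LEMMAS AND PROOFS =====

-- the per-subset value both programs maximize, for a subset c of the zipped pairs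
def pvVal (s : Int) (m : Option Int) (c : List (Int × Int)) : Int :=
  (s + (c.map Prod.fst).sum) *
    ((c.map Prod.snd).foldl (fun acc b => some (match acc with | none => b | some v => if b < v then b else v)) m).getD 0

-- Option-max of a list, combined exactly the way bGo combines take/skip
def omax : List Int → Option Int
  | [] => none
  | v :: rest =>
    match omax rest with
    | none => some v
    | some r => some (max v r)

lemma omax_append (l1 l2 : List Int) :
    omax (l1 ++ l2) =
      match omax l1, omax l2 with
      | none, sk => sk
      | some t, none => some t
      | some t, some sk => some (max t sk) := by
  induction l1 with
  | nil => cases h : omax l2 <;> simp [omax, h]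
  | cons v l1 ih =>
    simp only [List.cons_append, omax, ih]
    cases omax l1 <;> cases omax l2 <;> simp [max_assoc]

lemma bGo_spec (pairs : List (Int × Int)) (need : Nat) (s : Int) (m : Option Int) :
    bGo pairs need s m = omax ((PySem.List.combinations pairs need).map (pvVal s m)) := by
  induction pairs generalizing need s m with
  | nil =>
    cases need with
    | zero => simp [bGo, PySem.List.combinations_zero, pvVal, omax]
    | succ n => simp [bGo, PySem.List.combinations_nil_succ, omax]
  | cons p rest ih =>
    obtain ⟨a, b⟩ := p
    cases need with
    | zero => simp [bGo, PySem.List.combinations_zero, pvVal, omax]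
    | succ n =>
      simp only [bGo]
      by_cases hlen : ((a, b) :: rest).length < n + 1
      · rw [if_pos (by simpa using hlen),
          PySem.List.combinations_eq_nil_of_length_lt _ hlen]
        simp [omax]
      · rw [if_neg (by simpa using hlen), PySem.List.combinations_cons_succ, List.map_append,
          omax_append, ih n (s + a), ih (n + 1) s m, List.map_map]
        have hmap : (pvVal s m) ∘ (List.cons (a, b)) =
            pvVal (s + a) (some (match m with | none => b | some v => if b < v then b else v)) := by
          funext c
          simp only [Function.comp_apply, pvVal, List.map_cons, List.sum_cons, List.foldl_cons]
          ring_nf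
        rw [hmap]

-- A's loop, walking l1 while indexing into pre ++ Z2 starting at index pre.length
lemma aLoop_spec (l1 : List (List Int)) :
    ∀ (Z2 pre : List (List Int)) (mx : Int), l1.length = Z2.length →
    aLoop (pre ++ Z2) l1 (pre.length : Int) mx =
      (l1.zip Z2).foldl
        (fun mx p => max mx (p.1.sum * ((PySem.List.min? p.2 (fun x => x)).getD 0))) mx := by
  induction l1 with
  | nil => intro Z2 pre mx h; simp [aLoop]
  | cons c l1 ih =>
    intro Z2 pre mx h
    cases Z2 with
    | nil => simp at h
    | cons z Z2 =>
      simp only [aLoop, PySem.List.pyGet?_append_length, Option.getD_some, List.zip_cons_cons,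
        List.foldl_cons]
      have hre : pre ++ z :: Z2 = (pre ++ [z]) ++ Z2 := by simp
      have hidx : (pre.length : Int) + 1 = ((pre ++ [z]).length : Int) := by
        simp
      rw [hre, hidx, ih Z2 (pre ++ [z]) _ (by simpa using h)]
      congr 1
      omega

-- the foldl over the zipped pairs in B's accumulator form agrees with A's running max
lemma foldl_max_omax (vals : List Int) (mx : Int) :
    vals.foldl max mx =
      match omax vals with
      | none => mx
      | some r => max mx r := by
  induction vals generalizing mx with
  | nil => simp [omax]
  | cons v vals ih =>
    simp only [List.foldl_cons, omax, ih]
    cases omax vals with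
    | none => rfl
    | some r => show max (max mx v) r = max mx (max v r); omega

-- the per-subset value of a nonempty subset, written the way each port writes it
lemma pvVal_eq_min (c : List (Int × Int)) (hc : c ≠ []) :
    pvVal 0 none c = (c.map Prod.fst).sum * ((PySem.List.min? (c.map Prod.snd) (fun x => x)).getD 0) := by
  cases c with
  | nil => exact absurd rfl hc
  | cons p c =>
    simp only [pvVal, List.map_cons, PySem.List.min?_id_cons, List.foldl_cons, Option.getD_some,
      zero_add]
    have key : ∀ (l : List Int) (v : Int),
        (l.foldl (fun acc b => some (match acc with | none => b | some w => if b < w then b else w))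
          (some v)).getD 0 = l.foldl min v := by
      intro l
      induction l with
      | nil => intro v; simp
      | cons q l ih =>
        intro v
        simp only [List.foldl_cons, ih]
        congr 1
        omega
    rw [key]

-- ===== VERDICT (by name: the statement is the Claim_ definition above) =====
theorem maxScoreExcessMemory_spec : Claim_equal_maxScoreExcessMemory := by
  intro nums1 nums2 k _ hpre
  obtain ⟨hk, hlen⟩ := hpre
  unfold Spec_maxScoreExcessMemory
  simp only [maxScoreExcessMemory, maxScoreExcessMemory_alt]
  have hk1 : ¬ k < 1 := by omega
  rw [if_neg hk1]
  have hkn : 1 ≤ k.toNat := by omega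
  rcases hlen with heq | hlt
  · -- equal lengths
    by_cases hbig : nums1.length < k.toNat
    · -- k larger than both lists: A's combo list is empty, bGo returns none
      have hzlen : (nums1.zip nums2).length < k.toNat := by
        have := List.length_zip (l₁ := nums1) (l₂ := nums2); omega
      rw [PySem.List.combinations_eq_nil_of_length_lt _ hbig, bGo_spec,
        PySem.List.combinations_eq_nil_of_length_lt _ hzlen]
      simp [aLoop, omax]
    · -- the main case: 1 ≤ k ≤ len, both sides are the max over k-subsets of the zipped pairs
      rw [Nat.not_lt] at hbig
      have h1 : PySem.List.combinations nums1 k.toNat =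
          (PySem.List.combinations (nums1.zip nums2) k.toNat).map (List.map Prod.fst) := by
        rw [← PySem.List.combinations_map]
        congr 1
        exact (List.map_fst_zip (l₁ := nums1) (l₂ := nums2) (by omega)).symm
      have h2 : PySem.List.combinations nums2 k.toNat =
          (PySem.List.combinations (nums1.zip nums2) k.toNat).map (List.map Prod.snd) := by
        rw [← PySem.List.combinations_map]
        congr 1
        exact (List.map_snd_zip (l₁ := nums1) (l₂ := nums2) (by omega)).symm
      have hA := aLoop_spec (PySem.List.combinations nums1 k.toNat)
        (PySem.List.combinations nums2 k.toNat) [] 0 (by rw [h1, h2]; simp)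
      simp only [List.nil_append, List.length_nil, Nat.cast_zero] at hA
      rw [hA, h1, h2, List.zip_map', bGo_spec]
      set Z := PySem.List.combinations (nums1.zip nums2) k.toNat with hZ
      have hzip : (Z.map fun c => (c.map Prod.fst, c.map Prod.snd)).foldl
            (fun mx p => max mx (p.1.sum * ((PySem.List.min? p.2 (fun x => x)).getD 0))) 0 =
          (Z.map (pvVal 0 none)).foldl max 0 := by
        rw [List.foldl_map, List.foldl_map]
        apply List.foldl_ext
        intro mx c hc
        have hcne : c ≠ [] := by
          intro hnil
          have := PySem.List.length_of_mem_combinations hc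
          simp [hnil] at this; omega
        rw [pvVal_eq_min c hcne]
      rw [hzip, foldl_max_omax]
  · -- k exceeds nums1: both return 0
    have hbig : nums1.length < k.toNat := by omega
    have hzlen : (nums1.zip nums2).length < k.toNat := by
      have := List.length_zip (l₁ := nums1) (l₂ := nums2); omega
    rw [PySem.List.combinations_eq_nil_of_length_lt _ hbig, bGo_spec,
      PySem.List.combinations_eq_nil_of_length_lt _ hzlen]
    simp [aLoop, omax]
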